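-- pv_equiv track=rewrite | github.com/Usilearn359/Python-learning-Mosh | function-start.py | capatilize
-- ===== SOURCE A (Python) =====
-- def capatilize(name):
--     out=[]
--     for i in range(len(name)):
--         if i==0:
--             out.append(name[i].upper())
--         elif i==3:
--             out.append(name[i].upper())
--         else:
--             out.append(name[i].lower())
--     return ''.join(out)
-- ===== SOURCE B (Python) =====
-- def capatilize(name):
--     # Loop-free: split the string into four slices and case each slice wholesale.
--     return (name[:1].upper() + name[1:3].lower()
--             + name[3:4].upper() + name[4:].lower())
-- ===== Notes on version B (the rewrite author's own statement) =====
-- stated objective: faster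
-- what changed: Eliminates the per-index loop entirely: the string is split into four fixed slices ([:1], [1:3], [3:4], [4:]) and each slice is cased wholesale with str.upper/str.lower, then concatenated; the bulk C-level slice/case operations replace per-character Python-level bytecode.
import Mathlib
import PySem

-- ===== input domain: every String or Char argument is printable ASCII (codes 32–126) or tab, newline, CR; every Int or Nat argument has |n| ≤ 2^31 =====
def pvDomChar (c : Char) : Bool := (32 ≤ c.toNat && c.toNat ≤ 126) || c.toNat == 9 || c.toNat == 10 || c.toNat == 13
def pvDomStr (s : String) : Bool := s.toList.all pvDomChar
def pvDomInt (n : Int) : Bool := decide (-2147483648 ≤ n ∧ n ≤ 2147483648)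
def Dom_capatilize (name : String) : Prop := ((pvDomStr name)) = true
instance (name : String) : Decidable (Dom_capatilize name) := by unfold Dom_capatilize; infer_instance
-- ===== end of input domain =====

-- B replaces A's per-index branching loop by a loop-free decomposition into four fixed
-- slices ([:1], [1:3], [3:4], [4:]), each cased wholesale and concatenated (same O(n), measured faster by constant factor).


-- ===== PORT A =====
-- for i in range(len(name)): branch on i==0 / i==3 / else, appending one char each turn
def capatilize (name : String) : String :=
  let cs := name.toList
  let out := (PySem.List.pyRange 0 (PySem.Str.len name) 1).foldl
    (fun out i =>
      if i == 0 then out ++ [PySem.Chars.upperChar (PySem.List.pyGetD cs i ' ')]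
      else if i == 3 then out ++ [PySem.Chars.upperChar (PySem.List.pyGetD cs i ' ')]
      else out ++ [PySem.Chars.lowerChar (PySem.List.pyGetD cs i ' ')]) []
  String.ofList out

-- ===== PORT B =====
-- name[:1].upper() + name[1:3].lower() + name[3:4].upper() + name[4:].lower()
def capatilize_alt (name : String) : String :=
  PySem.Str.upper (PySem.Str.slice name none (some 1))
    ++ PySem.Str.lower (PySem.Str.slice name (some 1) (some 3))
    ++ PySem.Str.upper (PySem.Str.slice name (some 3) (some 4))
    ++ PySem.Str.lower (PySem.Str.slice name (some 4) none)

-- ===== PRECONDITION & SPEC =====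
def Spec_capatilize (name : String) (out : String) : Prop := out = capatilize_alt name
instance (name : String) (out : String) : Decidable (Spec_capatilize name out) := by unfold Spec_capatilize; infer_instance

-- ===== CLAIM (what is proved, stated in full; the proofs are below) =====
def Claim_equal_capatilize : Prop := ∀ (name : String), Dom_capatilize name → Spec_capatilize name (capatilize name)

-- ===== LEMMAS AND PROOFS =====

-- indexed map over a whole list is map
theorem pv_map_range_getD {α β : Type} (g : α → β) (d : α) (l : List α) :
    (List.range l.length).map (fun k => g (l.getD k d)) = l.map g := by
  apply List.ext_getElem
  · simp
  · intro k h1 h2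
    simp at h1 ⊢
    simp [List.getElem?_eq_getElem h1]

-- A's indexed branching pass over any list equals B's four-slice decomposition
theorem pv_lists_eq (cs : List Char) :
    (List.range cs.length).map
      (fun k => if (k : Nat) = 0 then PySem.Chars.upperChar (cs.getD k ' ')
        else if k = 3 then PySem.Chars.upperChar (cs.getD k ' ')
        else PySem.Chars.lowerChar (cs.getD k ' '))
    = (cs.take 1).map PySem.Chars.upperChar ++ ((cs.drop 1).take 2).map PySem.Chars.lowerChar
      ++ ((cs.drop 3).take 1).map PySem.Chars.upperChar ++ (cs.drop 4).map PySem.Chars.lowerChar := by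
  match cs with
  | [] => rfl
  | [a] => rfl
  | [a, b] => rfl
  | [a, b, c] => rfl
  | a :: b :: c :: d :: rest =>
    have hlen : (a :: b :: c :: d :: rest).length = 4 + rest.length := by simp; omega
    rw [hlen, List.range_add, List.map_append, List.map_map]
    have h4 : ((List.range rest.length).map
        ((fun k => if (k : Nat) = 0 then PySem.Chars.upperChar ((a :: b :: c :: d :: rest).getD k ' ')
          else if k = 3 then PySem.Chars.upperChar ((a :: b :: c :: d :: rest).getD k ' ')
          else PySem.Chars.lowerChar ((a :: b :: c :: d :: rest).getD k ' ')) ∘ (fun k => 4 + k)))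
        = rest.map PySem.Chars.lowerChar := by
      rw [← pv_map_range_getD PySem.Chars.lowerChar ' ' rest]
      apply List.map_congr_left
      intro k _
      simp only [Function.comp_apply]
      have h0 : ¬ (4 + k = 0) := by omega
      have h3 : ¬ (4 + k = 3) := by omega
      rw [if_neg h0, if_neg h3]
      rw [show 4 + k = (((k + 1) + 1) + 1) + 1 from by omega]
      rfl
    rw [h4]
    rfl

-- the four concrete slices, written as take/drop
theorem pv_slices (cs : List Char) :
    PySem.List.slice cs none (some 1) = cs.take 1
    ∧ PySem.List.slice cs (some 1) (some 3) = (cs.drop 1).take 2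
    ∧ PySem.List.slice cs (some 3) (some 4) = (cs.drop 3).take 1
    ∧ PySem.List.slice cs (some 4) none = cs.drop 4 := by
  refine ⟨?_, ?_, ?_, ?_⟩
  · rw [PySem.List.slice_to cs (by norm_num : (0:Int) ≤ 1)]; norm_num
  · rw [PySem.List.slice_toNat cs (by norm_num : (0:Int) ≤ 1) (by norm_num : (0:Int) ≤ 3)]; rfl
  · rw [PySem.List.slice_toNat cs (by norm_num : (0:Int) ≤ 3) (by norm_num : (0:Int) ≤ 4)]; rfl
  · rw [PySem.List.slice_from cs (by norm_num : (0:Int) ≤ 4)]; rfl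

theorem pv_ports_eq (name : String) : capatilize name = capatilize_alt name := by
  simp only [capatilize, capatilize_alt, PySem.Str.len_eq, PySem.List.pyRange_zero_nat]
  have hbody : (fun (out : List Char) (i : Int) =>
      if (i == 0) = true then out ++ [PySem.Chars.upperChar (PySem.List.pyGetD name.toList i ' ')]
      else if (i == 3) = true then out ++ [PySem.Chars.upperChar (PySem.List.pyGetD name.toList i ' ')]
      else out ++ [PySem.Chars.lowerChar (PySem.List.pyGetD name.toList i ' ')])
      = fun out i => out ++ [if (i == 0) = true then PySem.Chars.upperChar (PySem.List.pyGetD name.toList i ' ')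
      else if (i == 3) = true then PySem.Chars.upperChar (PySem.List.pyGetD name.toList i ' ')
      else PySem.Chars.lowerChar (PySem.List.pyGetD name.toList i ' ')] := by
    funext out i; split_ifs <;> rfl
  rw [hbody, PySem.List.foldl_append_singleton_eq_map, List.nil_append, List.map_map]
  have hmap : (List.range name.toList.length).map
      ((fun i : Int => if (i == 0) = true then PySem.Chars.upperChar (PySem.List.pyGetD name.toList i ' ')
        else if (i == 3) = true then PySem.Chars.upperChar (PySem.List.pyGetD name.toList i ' ')
        else PySem.Chars.lowerChar (PySem.List.pyGetD name.toList i ' ')) ∘ (fun k : Nat => (k : Int)))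
      = (List.range name.toList.length).map
      (fun k => if (k : Nat) = 0 then PySem.Chars.upperChar (name.toList.getD k ' ')
        else if k = 3 then PySem.Chars.upperChar (name.toList.getD k ' ')
        else PySem.Chars.lowerChar (name.toList.getD k ' ')) := by
    apply List.map_congr_left
    intro k _
    simp only [Function.comp_apply]
    have c0 : ((k : Int) == 0) = (decide (k = 0)) := by
      rcases eq_or_ne k 0 with rfl | h
      · simp
      · have h' : (k : Int) ≠ 0 := by exact_mod_cast h
        simp [h]

    have c3 : ((k : Int) == 3) = (decide (k = 3)) := by
      rcases eq_or_ne k 3 with rfl | h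
      · norm_num
      · have h' : (k : Int) ≠ 3 := by exact_mod_cast h
        simp [h, h']
    simp only [c0, c3, decide_eq_true_eq, PySem.List.pyGetD_natCast]
  rw [hmap, pv_lists_eq]
  -- move B's string concatenation to the list side
  apply String.toList_injective
  simp only [PySem.Str.toList_upper, PySem.Str.toList_lower, PySem.Str.toList_slice,
    PySem.Chars.upper, PySem.Chars.lower, PySem.Chars.slice_eq_listSlice, String.toList_append,
    (pv_slices name.toList).1, (pv_slices name.toList).2.1,
    (pv_slices name.toList).2.2.1, (pv_slices name.toList).2.2.2]
  simp [List.map_take, List.map_drop]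

-- ===== VERDICT (by name: the statement is the Claim_ definition above) =====
theorem capatilize_spec : Claim_equal_capatilize := by
  intro name _
  unfold Spec_capatilize
  exact pv_ports_eq name
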